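-- pv_equiv track=rewrite | github.com/Teshima-Tatsuya/AtCoder | ABC/044/a.py | totalPrice
-- ===== SOURCE A (Python) =====
-- def totalPrice(N, K, X, Y):
--     total = 0
--     for i in range(1, N + 1):
--         if i <= K:
--             total += X
--         else:
--             total += Y
--     return total
-- ===== SOURCE B (Python) =====
-- def totalPrice(N, K, X, Y):
--     n = max(N, 0)
--     c = min(max(K, 0), n)
--     return c * X + (n - c) * Y
-- ===== Notes on version B (the rewrite author's own statement) =====
-- stated objective: faster
-- what changed: Replaces the O(N) per-item loop with a closed-form formula: clamp(K,0,N) items at price X and the rest at price Y.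
import Mathlib
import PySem

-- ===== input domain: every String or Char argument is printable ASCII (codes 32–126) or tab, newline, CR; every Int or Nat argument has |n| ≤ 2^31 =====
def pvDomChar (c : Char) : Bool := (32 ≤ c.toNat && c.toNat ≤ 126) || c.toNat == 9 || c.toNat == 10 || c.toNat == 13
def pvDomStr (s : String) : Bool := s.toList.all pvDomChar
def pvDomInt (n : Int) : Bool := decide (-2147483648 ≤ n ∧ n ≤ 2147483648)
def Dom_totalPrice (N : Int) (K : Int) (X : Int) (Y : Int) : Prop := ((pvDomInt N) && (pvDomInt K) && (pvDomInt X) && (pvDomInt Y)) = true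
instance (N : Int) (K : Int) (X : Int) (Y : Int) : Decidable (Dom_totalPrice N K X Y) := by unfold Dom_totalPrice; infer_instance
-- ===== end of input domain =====

-- B replaces A's per-item loop with a closed-form formula (objective: faster).

-- ===== PORT A =====
-- A's 'for i in range(1, N + 1)' with accumulator 'total', as a tail-recursive
-- loop over the (lazy) range: i runs from 1 while i ≤ N.
def totalPriceGo (K : Int) (X : Int) (Y : Int) (N : Int) (i : Int) (total : Int) : Int :=
  if i ≤ N then
    totalPriceGo K X Y N (i + 1) (if i ≤ K then total + X else total + Y)
  else total
termination_by (N + 1 - i).toNat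
decreasing_by omega

def totalPrice (N : Int) (K : Int) (X : Int) (Y : Int) : Int :=
  totalPriceGo K X Y N 1 0

-- ===== PORT B =====
def totalPrice_alt (N : Int) (K : Int) (X : Int) (Y : Int) : Int :=
  let n := max N 0
  let c := min (max K 0) n
  c * X + (n - c) * Y

-- ===== PRECONDITION & SPEC =====
def Spec_totalPrice (N : Int) (K : Int) (X : Int) (Y : Int) (out : Int) : Prop := out = totalPrice_alt N K X Y
instance (N : Int) (K : Int) (X : Int) (Y : Int) (out : Int) : Decidable (Spec_totalPrice N K X Y out) := by unfold Spec_totalPrice; infer_instance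

-- ===== CLAIM (what is proved, stated in full; the proofs are below) =====
def Claim_equal_totalPrice : Prop := ∀ (N : Int) (K : Int) (X : Int) (Y : Int), Dom_totalPrice N K X Y → Spec_totalPrice N K X Y (totalPrice N K X Y)

-- ===== LEMMAS AND PROOFS =====

-- Invariant of A's loop: from position i it adds X for each remaining index ≤ K
-- and Y for the rest; the counts are clamped differences.
theorem totalPriceGo_eq (K X Y N i total : Int) :
    totalPriceGo K X Y N i total
      = total + (min (max (K + 1 - i) 0) (max (N + 1 - i) 0)) * X
              + (max (N + 1 - i) 0 - min (max (K + 1 - i) 0) (max (N + 1 - i) 0)) * Y := by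
  fun_induction totalPriceGo K X Y N i total with
  | case1 i total hiN ih =>
    simp only [dite_eq_ite] at ih
    rw [ih]
    by_cases hiK : i ≤ K
    · simp only [hiK, if_pos]
      have h1 : min (max (K + 1 - i) 0) (max (N + 1 - i) 0)
          = min (max (K + 1 - (i + 1)) 0) (max (N + 1 - (i + 1)) 0) + 1 := by omega
      have h2 : max (N + 1 - i) 0 = max (N + 1 - (i + 1)) 0 + 1 := by omega
      rw [h1, h2]; ring
    · simp only [hiK, if_neg, not_false_iff]
      have h1 : min (max (K + 1 - i) 0) (max (N + 1 - i) 0)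
          = min (max (K + 1 - (i + 1)) 0) (max (N + 1 - (i + 1)) 0) := by omega
      have h2 : max (N + 1 - i) 0 = max (N + 1 - (i + 1)) 0 + 1 := by omega
      rw [h1, h2]; ring
  | case2 i total hiN =>
    have h1 : max (N + 1 - i) 0 = (0 : Int) := by omega
    have h2 : min (max (K + 1 - i) 0) (0 : Int) = 0 := by omega
    rw [h1, h2]; ring

theorem totalPrice_spec' (N K X Y : Int) : totalPrice N K X Y = totalPrice_alt N K X Y := by
  unfold totalPrice totalPrice_alt
  rw [totalPriceGo_eq]
  have h1 : max (N + 1 - 1) 0 = max N 0 := by omega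
  have h2 : max (K + 1 - 1) 0 = max K 0 := by omega
  rw [h1, h2]; ring

-- ===== VERDICT (by name: the statement is the Claim_ definition above) =====
theorem totalPrice_spec : Claim_equal_totalPrice := by
  intro N K X Y _
  exact totalPrice_spec' N K X Y
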